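-- pv_equiv track=rewrite | github.com/ArnaudKeravis/xpcatalogue | scripts/sync-personae-images-from-zips.py | emit_ts
-- ===== SOURCE A (Python) =====
-- def emit_ts(ids_face: dict[str, str], ids_full: dict[str, str], ids_portrait: dict[str, str]) -> str:
--     """ids_* map personaId -> relative url path."""
--     all_ids = sorted(set(ids_face) | set(ids_full) | set(ids_portrait))
--
--     def block(name: str, d: dict[str, str]) -> str:
--         lines = [f"export const {name}: Record<string, string> = {{"]
--         for pid in all_ids:
--             if pid in d:
--                 lines.append(f'  "{pid}": "{d[pid]}",')
--         lines.append("};")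
--         return "\n".join(lines)
--
--     header = '''/**
--  * Persona imagery — three crops synced from design exports (`scripts/sync-personae-images-from-zips.py`).
--  * - face: small circular avatars (home page, chips)
--  * - full: hero on persona profile / description
--  * - portrait: area listing cards (`/[area]`)
--  */
--
-- const BASE = "/images/catalogue/assets/personae";
--
-- '''
--     return (
--         header
--         + block("PERSONA_FACE_URL", ids_face)
--         + "\n\n"
--         + block("PERSONA_FULL_URL", ids_full)
--         + "\n\n"
--         + block("PERSONA_LISTING_URL", ids_portrait)
--         + "\n"
--     )
-- ===== SOURCE B (Python) =====
-- def emit_ts(ids_face: dict[str, str], ids_full: dict[str, str], ids_portrait: dict[str, str]) -> str: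
--     """ids_* map personaId -> relative url path."""
--
--     def block(name: str, d: dict[str, str]) -> str:
--         lines = (
--             [f"export const {name}: Record<string, string> = {{"]
--             + [f'  "{pid}": "{d[pid]}",' for pid in sorted(d)]
--             + ["};"]
--         )
--         return "\n".join(lines)
--
--     header = '''/**
--  * Persona imagery — three crops synced from design exports (`scripts/sync-personae-images-from-zips.py`).
--  * - face: small circular avatars (home page, chips)
--  * - full: hero on persona profile / description
--  * - portrait: area listing cards (`/[area]`)
--  */
--
-- const BASE = "/images/catalogue/assets/personae";
--
-- '''
--     return (
--         header
--         + block("PERSONA_FACE_URL", ids_face)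
--         + "\n\n"
--         + block("PERSONA_FULL_URL", ids_full)
--         + "\n\n"
--         + block("PERSONA_LISTING_URL", ids_portrait)
--         + "\n"
--     )
-- ===== Notes on version B (the rewrite author's own statement) =====
-- stated objective: simpler
-- what changed: Drops the global sorted union of all three key sets and the per-block membership filter; each block simply sorts its own dict's keys and emits one line per key via a comprehension.
import Mathlib
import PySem

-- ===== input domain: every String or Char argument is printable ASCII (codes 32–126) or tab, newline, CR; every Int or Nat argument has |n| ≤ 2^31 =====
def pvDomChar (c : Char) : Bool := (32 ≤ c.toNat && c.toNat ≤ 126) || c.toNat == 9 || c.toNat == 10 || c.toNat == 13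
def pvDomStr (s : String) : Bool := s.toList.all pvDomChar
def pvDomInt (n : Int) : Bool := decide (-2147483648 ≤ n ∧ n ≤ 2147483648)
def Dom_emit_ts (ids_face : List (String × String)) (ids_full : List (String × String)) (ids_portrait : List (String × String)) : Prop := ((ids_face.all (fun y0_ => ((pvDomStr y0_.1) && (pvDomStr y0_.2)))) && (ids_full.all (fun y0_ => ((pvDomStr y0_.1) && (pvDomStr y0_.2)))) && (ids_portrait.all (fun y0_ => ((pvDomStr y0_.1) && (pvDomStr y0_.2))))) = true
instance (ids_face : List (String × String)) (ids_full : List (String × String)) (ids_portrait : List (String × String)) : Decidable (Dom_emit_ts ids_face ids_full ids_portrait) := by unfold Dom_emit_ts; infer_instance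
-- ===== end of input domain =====

-- B drops A's global sorted union of all three key sets and its per-block membership
-- filter: each block just sorts its own dict's keys (objective: simpler).

-- ===== PORT A =====
-- the module-level header string literal of A
def pvHeader : String := "/**\n * Persona imagery — three crops synced from design exports (`scripts/sync-personae-images-from-zips.py`).\n * - face: small circular avatars (home page, chips)\n * - full: hero on persona profile / description\n * - portrait: area listing cards (`/[area]`)\n */\n\nconst BASE = \"/images/catalogue/assets/personae\";\n\n"

-- A's inner 'block': a loop over all_ids appending a line when pid ∈ d.
-- d[pid] is ported as (d.get? pid).getD "" — exact here because it is evaluated only under 'd.contains pid'.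
def pvBlockA (all_ids : List String) (name : String) (d : PySem.Dict String String) : String :=
  let lines : List String :=
    all_ids.foldl
      (fun acc pid =>
        if d.contains pid then
          acc ++ ["  \"" ++ pid ++ "\": \"" ++ ((d.get? pid).getD "") ++ "\","]
        else acc)
      ["export const " ++ name ++ ": Record<string, string> = {"]
  PySem.Str.join "\n" (lines ++ ["};"])

def emit_ts (ids_face : List (String × String)) (ids_full : List (String × String)) (ids_portrait : List (String × String)) : String :=
  -- the Python parameters are dicts; the association lists are marshalled with dict()
  let dface := PySem.Dict.ofList ids_face
  let dfull := PySem.Dict.ofList ids_full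
  let dport := PySem.Dict.ofList ids_portrait
  -- all_ids = sorted(set(ids_face) | set(ids_full) | set(ids_portrait))
  let all_ids := PySem.List.sorted
    (PySem.Set.union (PySem.Set.union (PySem.Set.ofList dface.keys) dfull.keys) dport.keys)
    (fun x => x) false
  pvHeader
    ++ pvBlockA all_ids "PERSONA_FACE_URL" dface
    ++ "\n\n"
    ++ pvBlockA all_ids "PERSONA_FULL_URL" dfull
    ++ "\n\n"
    ++ pvBlockA all_ids "PERSONA_LISTING_URL" dport
    ++ "\n"

-- ===== PORT B =====
-- B's 'block': one line per key of d itself, in sorted order, by comprehension.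
def pvBlockB (name : String) (d : PySem.Dict String String) : String :=
  PySem.Str.join "\n"
    (["export const " ++ name ++ ": Record<string, string> = {"]
      ++ (PySem.List.sorted d.keys (fun x => x) false).map
          (fun pid => "  \"" ++ pid ++ "\": \"" ++ ((d.get? pid).getD "") ++ "\",")
      ++ ["};"])

def emit_ts_alt (ids_face : List (String × String)) (ids_full : List (String × String)) (ids_portrait : List (String × String)) : String :=
  pvHeader
    ++ pvBlockB "PERSONA_FACE_URL" (PySem.Dict.ofList ids_face)
    ++ "\n\n"
    ++ pvBlockB "PERSONA_FULL_URL" (PySem.Dict.ofList ids_full)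
    ++ "\n\n"
    ++ pvBlockB "PERSONA_LISTING_URL" (PySem.Dict.ofList ids_portrait)
    ++ "\n"

-- ===== PRECONDITION & SPEC =====
def Spec_emit_ts (ids_face : List (String × String)) (ids_full : List (String × String)) (ids_portrait : List (String × String)) (out : String) : Prop := out = emit_ts_alt ids_face ids_full ids_portrait
instance (ids_face : List (String × String)) (ids_full : List (String × String)) (ids_portrait : List (String × String)) (out : String) : Decidable (Spec_emit_ts ids_face ids_full ids_portrait out) := by unfold Spec_emit_ts; infer_instance

-- ===== CLAIM (what is proved, stated in full; the proofs are below) =====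
def Claim_equal_emit_ts : Prop := ∀ (ids_face : List (String × String)) (ids_full : List (String × String)) (ids_portrait : List (String × String)), Dom_emit_ts ids_face ids_full ids_portrait → Spec_emit_ts ids_face ids_full ids_portrait (emit_ts ids_face ids_full ids_portrait)

-- ===== LEMMAS AND PROOFS =====

-- Filtering the sorted union down to d's keys is sorting d's own keys.
theorem pv_filter_sorted (d : PySem.Dict String String) (U : List String)
    (hU : U.Nodup) (hnd : d.keys.Nodup) (hsub : ∀ a ∈ d.keys, a ∈ U) :
    (PySem.List.sorted U (fun x => x) false).filter (fun pid => d.contains pid)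
      = PySem.List.sorted d.keys (fun x => x) false := by
  symm
  apply PySem.List.sorted_eq_of_perm_of_pairwise_lt
  · -- permutation: both sides nodup with the same membership
    rw [List.perm_ext_iff_of_nodup]
    · intro a
      simp only [List.mem_filter, PySem.List.mem_sorted]
      constructor
      · rintro ⟨_, hc⟩
        exact (PySem.Dict.contains_iff_mem_keys d a).mp hc
      · intro hk
        exact ⟨hsub a hk, (PySem.Dict.contains_iff_mem_keys d a).mpr hk⟩
    · exact List.Nodup.filter _ ((PySem.List.sorted_perm U (fun x => x) false).nodup_iff.mpr hU)
    · exact hnd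
  · -- strictly increasing: pairwise ≤ from sortedness, ≠ from nodup
    apply List.Pairwise.filter
    have hle := PySem.List.sorted_pairwise (xs := U) (key := fun x => x)
    have hne : (PySem.List.sorted U (fun x => x) false).Nodup :=
      (PySem.List.sorted_perm U (fun x => x) false).nodup_iff.mpr hU
    exact (hle.and hne).imp (fun h => lt_of_le_of_ne h.1 h.2)

-- A's block over the sorted union equals B's block.
theorem pv_block_eq (name : String) (d : PySem.Dict String String) (U : List String)
    (hU : U.Nodup) (hnd : d.keys.Nodup) (hsub : ∀ a ∈ d.keys, a ∈ U) :
    pvBlockA (PySem.List.sorted U (fun x => x) false) name d = pvBlockB name d := by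
  unfold pvBlockA pvBlockB
  rw [PySem.List.foldl_append_if (p := fun pid => d.contains pid)]
  rw [pv_filter_sorted d U hU hnd hsub]

-- ===== VERDICT (by name: the statement is the Claim_ definition above) =====
theorem emit_ts_spec : Claim_equal_emit_ts := by
  intro ids_face ids_full ids_portrait _
  unfold Spec_emit_ts emit_ts emit_ts_alt
  dsimp only
  have hU : (PySem.Set.union (PySem.Set.union (PySem.Set.ofList (PySem.Dict.ofList ids_face).keys)
      (PySem.Dict.ofList ids_full).keys) (PySem.Dict.ofList ids_portrait).keys).Nodup :=
    PySem.Set.nodup_union _ _ (PySem.Set.nodup_union _ _ (PySem.Set.nodup_ofList _))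
  rw [pv_block_eq _ _ _ hU (PySem.Dict.nodup_keys_ofList _) ?hf,
      pv_block_eq _ _ _ hU (PySem.Dict.nodup_keys_ofList _) ?hl,
      pv_block_eq _ _ _ hU (PySem.Dict.nodup_keys_ofList _) ?hp]
  case hf =>
    intro a ha
    rw [PySem.Set.mem_union, PySem.Set.mem_union, PySem.Set.mem_ofList]
    exact Or.inl (Or.inl ha)
  case hl =>
    intro a ha
    rw [PySem.Set.mem_union, PySem.Set.mem_union]
    exact Or.inl (Or.inr ha)
  case hp =>
    intro a ha
    rw [PySem.Set.mem_union]
    exact Or.inr ha
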